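-- pv_equiv track=rewrite | github.com/KotisKotlyandii/lessons1 | ege22/76.py | f
-- ===== SOURCE A (Python) =====
-- def f(x):
--     a,b = 1,10
--     while x > 0:
--         c = x % 10
--         a *= c
--         if c < b:
--             b = c
--         x //= 10
--     return a,b
-- ===== SOURCE B (Python) =====
-- def f(x):
--     if x <= 0:
--         return (1, 10)
--     p, m = f(x // 10)
--     c = x % 10
--     return (p * c, min(m, c))
-- ===== Notes on version B (the rewrite author's own statement) =====
-- stated objective: simpler
-- what changed: Replaces A's iterative while-loop with two mutable accumulators by a structural recursion on the remaining digits that combines the last digit after the recursive call with * and min.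
import Mathlib
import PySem

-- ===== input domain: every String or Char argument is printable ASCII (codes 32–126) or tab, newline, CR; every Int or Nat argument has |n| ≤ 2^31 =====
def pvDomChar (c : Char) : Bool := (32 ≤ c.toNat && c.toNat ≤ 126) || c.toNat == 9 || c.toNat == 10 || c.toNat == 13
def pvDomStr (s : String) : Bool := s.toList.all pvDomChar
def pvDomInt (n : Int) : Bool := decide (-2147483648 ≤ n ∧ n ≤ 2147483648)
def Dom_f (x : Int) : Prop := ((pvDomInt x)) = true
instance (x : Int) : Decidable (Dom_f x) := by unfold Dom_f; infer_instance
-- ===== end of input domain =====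

-- B replaces A's while-loop with accumulators by a structural recursion on x // 10 (simpler decomposition).


-- ===== PORT A =====
-- the while-loop of A, state (x, a, b)
def fLoop (x a b : Int) : Int × Int :=
  if _h : x > 0 then
    let c := PySem.Int.mod x 10
    let a' := a * c
    let b' := if c < b then c else b
    fLoop (PySem.Int.floordiv x 10) a' b'
  else (a, b)
termination_by x.toNat
decreasing_by
  have h10 : PySem.Int.floordiv x 10 < x := by
    rw [PySem.Int.floordiv_lt_iff_lt_mul (by omega : (0:Int) < 10)]; omega
  omega

def f (x : Int) : Int × Int := fLoop x 1 10

-- ===== PORT B =====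
def f_alt (x : Int) : Int × Int :=
  if _h : x ≤ 0 then (1, 10)
  else
    let pm := f_alt (PySem.Int.floordiv x 10)
    let c := PySem.Int.mod x 10
    (pm.1 * c, min pm.2 c)
termination_by x.toNat
decreasing_by
  have h10 : PySem.Int.floordiv x 10 < x := by
    rw [PySem.Int.floordiv_lt_iff_lt_mul (by omega : (0:Int) < 10)]; omega
  omega

-- ===== PRECONDITION & SPEC =====
def Spec_f (x : Int) (out : Int × Int) : Prop := out = f_alt x
instance (x : Int) (out : Int × Int) : Decidable (Spec_f x out) := by unfold Spec_f; infer_instance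

-- ===== CLAIM (what is proved, stated in full; the proofs are below) =====
def Claim_equal_f : Prop := ∀ (x : Int), Dom_f x → Spec_f x (f x)

-- ===== LEMMAS AND PROOFS =====

theorem f_alt_min_le (x : Int) : (f_alt x).2 ≤ 10 := by
  induction x using f_alt.induct with
  | case1 x h => rw [f_alt]; simp [h]
  | case2 x h ih =>
    rw [f_alt]; simp only [h, dite_false]
    exact le_trans (min_le_left _ _) ih

theorem loop_eq (x : Int) : ∀ a b : Int, b ≤ 10 →
    fLoop x a b = (a * (f_alt x).1, min b (f_alt x).2) := by
  induction x using f_alt.induct with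
  | case1 x h =>
    intro a b hb
    rw [fLoop, f_alt]
    simp only [h, dite_true]
    have hx : ¬ x > 0 := by omega
    simp [hx]
    omega
  | case2 x h ih =>
    intro a b hb
    have hx : x > 0 := by omega
    rw [fLoop, f_alt]
    simp only [hx, h, dite_true, dite_false]
    set c := PySem.Int.mod x 10 with hc
    have hc10 : c ≤ 10 := by
      have := PySem.Int.mod_lt (a := x) (b := 10) (by omega)
      omega
    have hb' : (if c < b then c else b) ≤ 10 := by split_ifs <;> omega
    rw [ih _ _ hb']
    rcases (f_alt (PySem.Int.floordiv x 10)) with ⟨p, m⟩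
    refine Prod.ext ?_ ?_
    · show a * c * p = a * (p * c); ring
    · show min (if c < b then c else b) m = min b (min m c)
      simp only [min_def]
      split_ifs <;> omega

-- ===== VERDICT (by name: the statement is the Claim_ definition above) =====
theorem f_spec : Claim_equal_f := by
  intro x _
  unfold Spec_f f
  rw [loop_eq x 1 10 le_rfl]
  have := f_alt_min_le x
  rcases h : f_alt x with ⟨p, m⟩
  rw [h] at this
  simp
  omega
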